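-- pv_equiv track=rewrite | github.com/arin17bishwa/myCP_sols | SPOJ/EDIT.py | func
-- ===== SOURCE A (Python) =====
-- def func(s):
--     n = len(s)
--     p = q = 0
--     for i in range(n):
--         if i & 1:
--             if s[i].islower():
--                 p += 1
--             else:
--                 q += 1
--         else:
--             if s[i].isupper():
--                 p += 1
--             else:
--                 q += 1
--     return min(p, q)
-- ===== SOURCE B (Python) =====
-- def func(s):
--     p = sum(1 for c in s[::2] if c.isupper()) + sum(1 for c in s[1::2] if c.islower())
--     return min(p, len(s) - p)
-- ===== Notes on version B (the rewrite author's own statement) =====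
-- stated objective: faster
-- what changed: Replaces the interleaved per-index loop maintaining two counters p and q with two strided-slice bulk passes (uppercase count on s[::2] plus lowercase count on s[1::2]) and computes q as the complement len(s) - p, returning min(p, len(s) - p).
import Mathlib
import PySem

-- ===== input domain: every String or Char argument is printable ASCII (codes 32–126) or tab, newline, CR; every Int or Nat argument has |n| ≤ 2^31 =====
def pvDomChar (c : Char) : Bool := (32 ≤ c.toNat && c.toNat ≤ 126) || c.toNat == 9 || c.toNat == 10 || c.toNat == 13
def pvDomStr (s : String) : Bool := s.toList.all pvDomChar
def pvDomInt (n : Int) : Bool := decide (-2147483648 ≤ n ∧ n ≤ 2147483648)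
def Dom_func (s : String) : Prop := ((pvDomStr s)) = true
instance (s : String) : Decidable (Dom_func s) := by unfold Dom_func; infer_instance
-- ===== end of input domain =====

-- B replaces the interleaved two-counter loop by two strided-slice bulk counts and the complement n - p (different decomposition; measurably faster by constant factor in CPython).

-- ===== PORT A =====
-- interleaved loop over range(n), indexing s[i] (always in range), two counters
def func (s : String) : Int :=
  let cs := s.toList
  let n : Int := cs.length
  let pq := (PySem.List.pyRange 0 n 1).foldl (fun (pq : Int × Int) i =>
      if PySem.Int.mod i 2 ≠ 0 then
        if PySem.Chars.islower (PySem.List.pyGetD cs i ' ') then (pq.1 + 1, pq.2) else (pq.1, pq.2 + 1)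
      else
        if PySem.Chars.isupper (PySem.List.pyGetD cs i ' ') then (pq.1 + 1, pq.2) else (pq.1, pq.2 + 1))
    ((0 : Int), (0 : Int))
  min pq.1 pq.2

-- ===== PORT B =====
-- p = uppercase count on s[::2] + lowercase count on s[1::2]; result min(p, n - p)
def func_alt (s : String) : Int :=
  let cs := s.toList
  let p : Int := (((PySem.List.slice? cs none none 2).getD []).countP PySem.Chars.isupper : Nat)
               + (((PySem.List.slice? cs (some 1) none 2).getD []).countP PySem.Chars.islower : Nat)
  min p ((cs.length : Int) - p)

-- ===== PRECONDITION & SPEC =====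
def Spec_func (s : String) (out : Int) : Prop := out = func_alt s
instance (s : String) (out : Int) : Decidable (Spec_func s out) := by unfold Spec_func; infer_instance

-- ===== CLAIM (what is proved, stated in full; the proofs are below) =====
def Claim_equal_func : Prop := ∀ (s : String), Dom_func s → Spec_func s (func s)

-- ===== LEMMAS AND PROOFS =====

-- proof-side helpers: even/odd-indexed sublists, A's per-index increment to p, A's loop body
mutual
def pvEvens : List Char → List Char
  | [] => []
  | c :: t => c :: pvOdds t
def pvOdds : List Char → List Char
  | [] => []
  | _ :: t => pvEvens t
end

def pvCnt : List Char → Nat → Int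
  | [], _ => 0
  | c :: t, k =>
      (if (if k % 2 = 1 then PySem.Chars.islower c else PySem.Chars.isupper c) then (1 : Int) else 0)
      + pvCnt t (k + 1)
def pvStep (pq : Int × Int) (ic : Int × Char) : Int × Int :=
  if PySem.Int.mod ic.1 2 ≠ 0 then
    if PySem.Chars.islower ic.2 then (pq.1 + 1, pq.2) else (pq.1, pq.2 + 1)
  else
    if PySem.Chars.isupper ic.2 then (pq.1 + 1, pq.2) else (pq.1, pq.2 + 1)
lemma pvMod2 (k : Nat) : (PySem.Int.mod (k : Int) 2 ≠ 0) ↔ k % 2 = 1 := by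
  simp [PySem.Int.mod, Int.fmod_eq_emod_of_nonneg]; omega
lemma pvLoopA (cs : List Char) (k : Nat) (p q : Int) :
    (PySem.List.enumerate cs (k : Int)).foldl pvStep (p, q)
      = (p + pvCnt cs k, q + ((cs.length : Int) - pvCnt cs k)) := by
  induction cs generalizing k p q with
  | nil => simp [PySem.List.enumerate, pvCnt]
  | cons c t ih =>
    rw [PySem.List.enumerate_cons]
    have hcast : ((k : Int) + 1) = ((k + 1 : Nat) : Int) := by push_cast; ring
    simp only [List.foldl_cons, hcast, pvStep, pvCnt]
    by_cases h : k % 2 = 1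
    · rw [if_pos ((pvMod2 k).mpr h), if_pos h]
      by_cases hl : PySem.Chars.islower c = true <;>
        · simp only [hl, if_pos, if_neg, Bool.false_eq_true, not_false_iff]
          rw [ih]
          simp only [Prod.ext_iff, List.length_cons]; push_cast; constructor <;> omega
    · rw [if_neg (fun hc => h ((pvMod2 k).mp hc)), if_neg h]
      by_cases hl : PySem.Chars.isupper c = true <;>
        · simp only [hl, if_pos, if_neg, Bool.false_eq_true, not_false_iff]
          rw [ih]
          simp only [Prod.ext_iff, List.length_cons]; push_cast; constructor <;> omega
lemma pvCnt_pair (cs : List Char) : ∀ (k : Nat),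
    pvCnt cs k = if k % 2 = 0
      then ((pvEvens cs).countP PySem.Chars.isupper : Int) + ((pvOdds cs).countP PySem.Chars.islower : Int)
      else ((pvEvens cs).countP PySem.Chars.islower : Int) + ((pvOdds cs).countP PySem.Chars.isupper : Int) := by
  induction cs with
  | nil => intro k; simp [pvCnt, pvEvens, pvOdds]
  | cons c t ih =>
    intro k
    have h1 := ih (k + 1)
    simp only [pvCnt, pvEvens, pvOdds, List.countP_cons, h1]
    by_cases h : k % 2 = 0
    · have h2 : ¬ (k + 1) % 2 = 0 := by omega
      have h3 : ¬ k % 2 = 1 := by omega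
      simp only [h, h2, if_true]
      by_cases hu : PySem.Chars.isupper c = true <;> simp [hu] <;> ring
    · have h2 : (k + 1) % 2 = 0 := by omega
      have h3 : k % 2 = 1 := by omega
      simp only [h2, h3]
      by_cases hu : PySem.Chars.islower c = true <;> simp [hu] <;> ring
lemma pvSliceEv (cs : List Char) :
    (PySem.List.slice? cs none none 2).getD []
      = List.filterMap (fun k => cs[2 * k]?) (List.range ((cs.length + 1) / 2)) := by
  simp only [PySem.List.slice?, PySem.List.sliceIndices]
  norm_num
  have hc : (if 0 < cs.length then (((cs.length : Int) + 2 - 1) / 2).toNat else 0)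
      = (cs.length + 1) / 2 := by
    split_ifs with h
    · have h1 : ((cs.length : Int) + 2 - 1) = ((cs.length + 1 : Nat) : Int) := by push_cast; ring
      rw [h1, show ((2:Int)) = ((2:Nat):Int) by norm_num, ← Int.natCast_div, Int.toNat_natCast]
    · omega
  rw [hc]
  congr 1
lemma pvFM (cs : List Char) :
    List.filterMap (fun k => cs[2 * k]?) (List.range ((cs.length + 1) / 2)) = pvEvens cs
    ∧ List.filterMap (fun k => cs[1 + 2 * k]?) (List.range (cs.length / 2)) = pvOdds cs := by
  induction cs with
  | nil => simp [pvEvens, pvOdds]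
  | cons c t ih =>
    constructor
    · have hl : ((c :: t).length + 1) / 2 = t.length / 2 + 1 := by
        simp only [List.length_cons]; omega
      rw [hl, List.range_succ_eq_map, List.filterMap_cons, List.filterMap_map]
      simp only [Nat.mul_zero, List.getElem?_cons_zero, Function.comp]
      have hf : (fun k => (c :: t)[2 * (k + 1)]?) = (fun k => t[1 + 2 * k]?) := by
        funext k
        have : 2 * (k + 1) = (1 + 2 * k) + 1 := by omega
        rw [this, List.getElem?_cons_succ]
      rw [show (fun a => (c :: t)[2 * (a + 1)]?) = (fun k => t[1 + 2 * k]?) from hf, ih.2]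
      simp [pvEvens]
    · have hl : (c :: t).length / 2 = (t.length + 1) / 2 := by
        simp only [List.length_cons]
      rw [hl]
      have hf : (fun k => (c :: t)[1 + 2 * k]?) = (fun k => t[2 * k]?) := by
        funext k
        have : 1 + 2 * k = 2 * k + 1 := by omega
        rw [this, List.getElem?_cons_succ]
      rw [hf, ih.1]
      simp [pvOdds]
lemma pvSliceOd (cs : List Char) :
    (PySem.List.slice? cs (some 1) none 2).getD []
      = List.filterMap (fun k => cs[1 + 2 * k]?) (List.range (cs.length / 2)) := by
  cases cs with
  | nil => decide
  | cons c t =>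
    simp only [PySem.List.slice?, PySem.List.sliceIndices]
    norm_num
    have hc : (if 0 < t.length then (((t.length : Int) + 2 - 1) / 2).toNat else 0)
        = (t.length + 1) / 2 := by
      split_ifs with h
      · have h1 : ((t.length : Int) + 2 - 1) = ((t.length + 1 : Nat) : Int) := by push_cast; ring
        rw [h1, show ((2:Int)) = ((2:Nat):Int) by norm_num, ← Int.natCast_div, Int.toNat_natCast]
      · omega
    rw [hc]
    congr 1

lemma pvSlices (cs : List Char) :
    (PySem.List.slice? cs none none 2).getD [] = pvEvens cs
      ∧ (PySem.List.slice? cs (some 1) none 2).getD [] = pvOdds cs := by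
  rw [pvSliceEv, pvSliceOd, (pvFM cs).1, (pvFM cs).2]
  exact ⟨rfl, rfl⟩

-- ===== VERDICT (by name: the statement is the Claim_ definition above) =====
theorem func_spec : Claim_equal_func := by
  intro s _
  unfold Spec_func func func_alt
  have hloop : (PySem.List.pyRange 0 ((s.toList.length : Int)) 1).foldl
      (fun (pq : Int × Int) i =>
        if PySem.Int.mod i 2 ≠ 0 then
          if PySem.Chars.islower (PySem.List.pyGetD s.toList i ' ') then (pq.1 + 1, pq.2) else (pq.1, pq.2 + 1)
        else
          if PySem.Chars.isupper (PySem.List.pyGetD s.toList i ' ') then (pq.1 + 1, pq.2) else (pq.1, pq.2 + 1))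
      ((0 : Int), (0 : Int))
      = (PySem.List.enumerate s.toList 0).foldl pvStep (0, 0) := by
    rw [PySem.List.enumerate_eq_map_pyRange s.toList ' ', List.foldl_map]
    rfl
  have h0 : ((0 : Nat) : Int) = (0 : Int) := by norm_num
  have hA := pvLoopA s.toList 0 0 0
  rw [h0] at hA
  simp only [hloop, hA]
  rw [pvCnt_pair s.toList 0]
  rw [(pvSlices s.toList).1, (pvSlices s.toList).2]
  simp
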